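-- pv_equiv track=rewrite | github.com/Beliavsky/Pure-Fortran | xgoto.py | find_statement_lines
-- ===== SOURCE A (Python) =====
-- from typing import Dict, Iterable, List, Optional, Set, Tuple
--
-- def split_eol(raw: str) -> Tuple[str, str]:
--     if raw.endswith("\r\n"):
--         return raw[:-2], "\r\n"
--     if raw.endswith("\n"):
--         return raw[:-1], "\n"
--     return raw, ""
--
-- def split_code_comment(line_noeol: str) -> Tuple[str, str]:
--     in_single = False
--     in_double = False
--     i = 0
--     while i < len(line_noeol):
--         ch = line_noeol[i]
--         if ch == "'" and not in_double:
--             if in_single and i + 1 < len(line_noeol) and line_noeol[i + 1] == "'":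
--                 i += 2
--                 continue
--             in_single = not in_single
--             i += 1
--             continue
--         if ch == '"' and not in_single:
--             if in_double and i + 1 < len(line_noeol) and line_noeol[i + 1] == '"':
--                 i += 2
--                 continue
--             in_double = not in_double
--             i += 1
--             continue
--         if ch == "!" and not in_single and not in_double:
--             return line_noeol[:i], line_noeol[i:]
--         i += 1
--     return line_noeol, ""
--
-- def find_statement_lines(lines: List[str]) -> List[int]:
--     out: List[int] = []
--     for i, raw in enumerate(lines, start=1):
--         body, _eol = split_eol(raw)
--         code, _comment = split_code_comment(body)
--         if code.strip():
--             out.append(i)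
--     return out
-- ===== SOURCE B (Python) =====
-- def find_statement_lines(lines):
--     # A line holds code iff its first non-whitespace character exists and is not '!':
--     # any '!' inside quotes is preceded by a (non-whitespace) quote character, so the
--     # quote-tracking state machine is unnecessary for this predicate.
--     out = []
--     for i, raw in enumerate(lines, start=1):
--         s = raw.lstrip()
--         if s and not s.startswith("!"):
--             out.append(i)
--     return out
-- ===== Notes on version B (the rewrite author's own statement) =====
-- stated objective: simpler
-- what changed: B drops A's EOL-splitting and quote-tracking code/comment state machine entirely: a line holds code iff its first non-whitespace character exists and is not '!', since any '!' hidden inside quotes is necessarily preceded by a non-whitespace quote character; so B just lstrips each line and checks its head.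
import Mathlib
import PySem

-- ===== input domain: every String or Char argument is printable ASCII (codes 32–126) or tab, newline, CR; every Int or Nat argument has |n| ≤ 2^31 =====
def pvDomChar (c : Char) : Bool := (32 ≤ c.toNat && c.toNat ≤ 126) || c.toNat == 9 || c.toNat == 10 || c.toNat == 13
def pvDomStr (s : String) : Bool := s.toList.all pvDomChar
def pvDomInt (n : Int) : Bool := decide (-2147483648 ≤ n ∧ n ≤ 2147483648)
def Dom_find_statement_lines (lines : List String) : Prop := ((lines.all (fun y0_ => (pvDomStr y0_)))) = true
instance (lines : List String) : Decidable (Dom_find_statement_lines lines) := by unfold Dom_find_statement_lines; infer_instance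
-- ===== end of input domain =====

set_option maxRecDepth 8192


-- B replaces A's quote-tracking scanner by the observation that a line holds code iff its
-- first non-whitespace character exists and is not '!' (objective: simpler).

-- ===== PORT A =====
-- split_eol: strip a trailing "\r\n" or "\n"
def splitEolA (cs : List Char) : List Char × List Char :=
  if PySem.Chars.endswith cs ['\r', '\n'] then
    (PySem.Chars.slice cs none (some (-2)), ['\r', '\n'])
  else if PySem.Chars.endswith cs ['\n'] then
    (PySem.Chars.slice cs none (some (-1)), ['\n'])
  else (cs, [])

-- split_code_comment: the index loop becomes recursion on the remaining characters,
-- carrying the same in_single/in_double state; line[:i] / line[i:] become the code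
-- accumulated so far / the rest.
def sccGo (s d : Bool) : List Char → List Char × List Char
  | [] => ([], [])
  | c :: rest =>
    if c = '\'' ∧ d = false then
      if s = true ∧ rest.head? = some '\'' then
        match rest with
        | c2 :: rest2 => let p := sccGo s d rest2; (c :: c2 :: p.1, p.2)
        | [] => ([], [])
      else
        let p := sccGo (!s) d rest; (c :: p.1, p.2)
    else if c = '"' ∧ s = false then
      if d = true ∧ rest.head? = some '"' then
        match rest with
        | c2 :: rest2 => let p := sccGo s d rest2; (c :: c2 :: p.1, p.2)
        | [] => ([], [])
      else
        let p := sccGo s (!d) rest; (c :: p.1, p.2)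
    else if c = '!' ∧ s = false ∧ d = false then
      ([], c :: rest)
    else
      let p := sccGo s d rest; (c :: p.1, p.2)

def split_code_comment (cs : List Char) : List Char × List Char := sccGo false false cs

def find_statement_lines (lines : List String) : List Int :=
  (List.foldl (fun (acc : List Int × Int) raw =>
      let body := (splitEolA raw.toList).1
      let code := (split_code_comment body).1
      if (PySem.Chars.strip code).isEmpty then (acc.1, acc.2 + 1)
      else (acc.1 ++ [acc.2], acc.2 + 1))
    ([], 1) lines).1

-- ===== PORT B =====
def find_statement_lines_alt (lines : List String) : List Int :=
  (List.foldl (fun (acc : List Int × Int) raw =>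
      let s := PySem.Chars.lstrip raw.toList
      (if !s.isEmpty && !PySem.Chars.startswith s ['!'] then acc.1 ++ [acc.2] else acc.1,
       acc.2 + 1))
    ([], 1) lines).1

-- ===== PRECONDITION & SPEC =====
def Spec_find_statement_lines (lines : List String) (out : List Int) : Prop := out = find_statement_lines_alt lines
instance (lines : List String) (out : List Int) : Decidable (Spec_find_statement_lines lines out) := by unfold Spec_find_statement_lines; infer_instance

-- ===== CLAIM (what is proved, stated in full; the proofs are below) =====
def Claim_equal_find_statement_lines : Prop := ∀ (lines : List String), Dom_find_statement_lines lines → Spec_find_statement_lines lines (find_statement_lines lines)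

-- ===== LEMMAS AND PROOFS =====

-- B's per-line keep condition
def keepB (cs : List Char) : Bool :=
  let s := PySem.Chars.lstrip cs
  !s.isEmpty && !PySem.Chars.startswith s ['!']

lemma rstrip_eq_nil_iff (l : List Char) :
    PySem.Chars.rstrip l = [] ↔ ∀ c ∈ l, PySem.Chars.isspace c = true := by
  simp [PySem.Chars.rstrip, List.dropWhile_eq_nil_iff]

lemma strip_cons_of_space {c : Char} (h : PySem.Chars.isspace c = true) (l : List Char) :
    PySem.Chars.strip (c :: l) = PySem.Chars.strip l := by
  simp [PySem.Chars.strip, PySem.Chars.lstrip, h]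

lemma strip_cons_ne_nil {c : Char} (h : PySem.Chars.isspace c = false) (l : List Char) :
    (PySem.Chars.strip (c :: l)).isEmpty = false := by
  simp only [PySem.Chars.strip, PySem.Chars.lstrip, List.dropWhile_cons, h]
  simp only [Bool.false_eq_true, if_false, List.isEmpty_eq_false_iff, ne_eq]
  intro hnil
  rw [rstrip_eq_nil_iff] at hnil
  have := hnil c (by simp)
  simp [this] at h

lemma keepB_cons_nonspace {c : Char} (h : PySem.Chars.isspace c = false) (l : List Char) :
    keepB (c :: l) = !decide (c = '!') := by
  simp only [keepB, PySem.Chars.lstrip, List.dropWhile_cons, h, Bool.false_eq_true,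
    if_false, List.isEmpty_cons, PySem.Chars.startswith, List.isPrefixOf, Bool.and_true, Bool.not_false, Bool.true_and]
  by_cases hc : c = '!'
  · subst hc; simp
  · have h1 : ('!' == c) = false := beq_eq_false_iff_ne.2 (Ne.symm hc)
    simp [h1, hc]

-- the per-line equivalence: A's "code part is non-blank" equals B's keep condition
lemma perline (cs : List Char) :
    (PySem.Chars.strip (sccGo false false cs).1).isEmpty = !keepB cs := by
  induction cs with
  | nil => simp [sccGo, PySem.Chars.strip, PySem.Chars.lstrip, PySem.Chars.rstrip, keepB]
  | cons c rest ih =>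
    by_cases hsp : PySem.Chars.isspace c = true
    · have h1 : ¬ c = '\'' := by rintro rfl; simp [PySem.Chars.isspace] at hsp
      have h2 : ¬ c = '"' := by rintro rfl; simp [PySem.Chars.isspace] at hsp
      have h3 : ¬ c = '!' := by rintro rfl; simp [PySem.Chars.isspace] at hsp
      rw [show sccGo false false (c :: rest)
            = (c :: (sccGo false false rest).1, (sccGo false false rest).2) by
          rw [sccGo.eq_def]; simp [h1, h2, h3]]
      rw [strip_cons_of_space hsp, ih]
      simp [keepB, PySem.Chars.lstrip, hsp]
    · have hsp' : PySem.Chars.isspace c = false := by simpa using hsp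
      rw [keepB_cons_nonspace hsp']
      by_cases hc : c = '!'
      · subst hc
        rw [show sccGo false false ('!' :: rest) = ([], '!' :: rest) by
          rw [sccGo.eq_def]; simp]
        simp [PySem.Chars.strip, PySem.Chars.lstrip, PySem.Chars.rstrip]
      · have hhead : ∃ X, (sccGo false false (c :: rest)).1 = c :: X := by
          by_cases h1 : c = '\''
          · subst h1
            exact ⟨(sccGo true false rest).1, by rw [sccGo.eq_def]; simp⟩
          · by_cases h2 : c = '"'
            · subst h2
              exact ⟨(sccGo false true rest).1, by rw [sccGo.eq_def]; simp [h1]⟩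
            · exact ⟨(sccGo false false rest).1, by
                rw [sccGo.eq_def]; simp [h1, h2, hc]⟩
        obtain ⟨X, hX⟩ := hhead
        rw [hX, strip_cons_ne_nil hsp']
        simp [hc]

-- removing trailing whitespace does not change B's keep condition
lemma keepB_append_ws (t : List Char) (x : List Char)
    (hx : ∀ c ∈ x, PySem.Chars.isspace c = true) : keepB (t ++ x) = keepB t := by
  simp only [keepB, PySem.Chars.lstrip, List.dropWhile_append]
  by_cases h : (List.dropWhile PySem.Chars.isspace t).isEmpty
  · simp [h, List.dropWhile_eq_nil_iff.2 (fun c hc => hx c hc)]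
  · have hne : List.dropWhile PySem.Chars.isspace t ≠ [] := by
      simpa [List.isEmpty_iff] using h
    rcases List.exists_cons_of_ne_nil hne with ⟨c, r, hcr⟩
    rw [hcr]
    simp [PySem.Chars.startswith, List.isPrefixOf]

lemma keepB_splitEol (cs : List Char) : keepB (splitEolA cs).1 = keepB cs := by
  unfold splitEolA
  by_cases h2 : PySem.Chars.endswith cs ['\r', '\n'] = true
  · rcases (PySem.Chars.endswith_iff cs ['\r', '\n']).1 h2 with ⟨t, ht⟩
    subst ht
    rw [if_pos h2]
    have hs : PySem.Chars.slice (t ++ ['\r', '\n']) none (some (-2)) = t := by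
      simp [PySem.Chars.slice_eq_listSlice, PySem.List.slice, PySem.List.clampIdx]
    rw [hs]
    exact (keepB_append_ws t ['\r', '\n'] (by intro c hc; fin_cases hc <;> decide)).symm
  · rw [if_neg h2]
    by_cases h1 : PySem.Chars.endswith cs ['\n'] = true
    · rcases (PySem.Chars.endswith_iff cs ['\n']).1 h1 with ⟨t, ht⟩
      subst ht
      rw [if_pos h1]
      have hs : PySem.Chars.slice (t ++ ['\n']) none (some (-1)) = t := by
        simp [pysem]
      rw [hs]
      exact (keepB_append_ws t ['\n'] (by intro c hc; fin_cases hc <;> decide)).symm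
    · rw [if_neg h1]

-- ===== VERDICT (by name: the statement is the Claim_ definition above) =====
theorem find_statement_lines_spec : Claim_equal_find_statement_lines := by
  intro lines _
  unfold Spec_find_statement_lines find_statement_lines find_statement_lines_alt
  congr 1
  apply List.foldl_ext
  intro acc raw _
  simp only [split_code_comment, perline, keepB_splitEol]
  have hB : (!(PySem.Chars.lstrip raw.toList).isEmpty
      && !PySem.Chars.startswith (PySem.Chars.lstrip raw.toList) ['!']) = keepB raw.toList := rfl
  cases hk : keepB raw.toList <;> simp [hk, hB]
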